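-- pv_equiv track=rewrite | github.com/HeewonKwak/algo_test | programmers/기출/2개 이하로 다른 비트.py | solution
-- ===== SOURCE A (Python) =====
-- from collections import defaultdict
--
-- def solution(numbers):
--     answer = []
--     bit = defaultdict(int)
--     for number in numbers:
--         a = 0
--         for num in bin(number)[::-1]:
--             if num == '0' or num == 'b':
--                 break
--             a += 1
--         if a == 0:
--             answer.append(number + 1)
--         else:
--             answer.append(number + pow(2,a-1))
--     return answer
-- ===== SOURCE B (Python) =====
-- def solution(numbers):
--     # n ^ (n + 1) is a mask of the trailing one-bits of n plus one more bit,
--     # so ((n ^ (n + 1)) + 1) >> 2 equals 2**(a - 1) for a trailing ones (0 when a == 0).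
--     return [n + max(1, ((n ^ (n + 1)) + 1) >> 2) for n in numbers]
-- ===== Notes on version B (the rewrite author's own statement) =====
-- stated objective: idiomatic
-- what changed: Replaces A's per-number binary-string construction (bin), reversed character scan and if/else (plus an unused defaultdict) with the closed-form bit identity ((n ^ (n+1)) + 1) >> 2 = 2^(trailing ones - 1) in a single list comprehension; Pre_ excludes lists containing an odd number below -1, where A's value reflects bin()'s sign-magnitude digit string while B's bit arithmetic is two's-complement — neither value is specified for the problem's natural domain of nonnegative integers, and on -1 and even negatives the two agree.
-- outside the precondition, e.g. on solution([-3]): A returns [-1], B returns [-2]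
import Mathlib
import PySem

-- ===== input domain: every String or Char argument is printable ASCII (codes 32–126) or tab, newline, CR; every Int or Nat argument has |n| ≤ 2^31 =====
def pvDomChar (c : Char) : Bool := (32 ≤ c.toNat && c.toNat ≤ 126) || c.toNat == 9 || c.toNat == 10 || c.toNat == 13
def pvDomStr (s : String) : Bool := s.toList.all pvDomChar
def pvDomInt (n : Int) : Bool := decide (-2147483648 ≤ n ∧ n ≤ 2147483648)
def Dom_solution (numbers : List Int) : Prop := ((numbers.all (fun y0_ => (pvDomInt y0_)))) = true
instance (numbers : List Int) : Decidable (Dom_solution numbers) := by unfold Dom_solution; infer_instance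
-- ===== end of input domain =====

-- B replaces A's per-number binary-string construction and reversed character scan with the
-- closed-form bit identity ((n ^ (n+1)) + 1) >> 2 in a single list comprehension (objective:
-- idiomatic); Pre_ excludes only lists containing an odd number below -1 (see its comment).

-- ===== PORT A =====
-- helper for Python's builtin bin: binary digits of m, least-significant first
def pvDigsLSB (m : Nat) : List Char :=
  if h : m = 0 then []
  else (if m % 2 = 1 then '1' else '0') :: pvDigsLSB (m / 2)
  decreasing_by exact Nat.div_lt_self (Nat.pos_of_ne_zero h) (by norm_num)

-- bin(number) as a list of chars ("-0b…" / "0b0" / "0b…")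
def pvBinList (n : Int) : List Char :=
  if n < 0 then '-' :: '0' :: 'b' :: (pvDigsLSB n.natAbs).reverse
  else if n = 0 then ['0', 'b', '0']
  else '0' :: 'b' :: (pvDigsLSB n.natAbs).reverse

-- the inner for-loop with break: count chars until '0' or 'b'
def pvCountA : List Char → Nat
  | [] => 0
  | c :: rest => if c = '0' ∨ c = 'b' then 0 else 1 + pvCountA rest

def solution (numbers : List Int) : List Int :=
  numbers.foldl
    (fun answer number =>
      let a := pvCountA ((pvBinList number).reverse)
      if a = 0 then answer ++ [number + 1]
      else answer ++ [number + (2 : Int) ^ (a - 1)])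
    []

-- ===== PORT B =====
def solution_alt (numbers : List Int) : List Int :=
  numbers.map (fun n => n + max 1 ((Int.xor n (n + 1) + 1) >>> (2 : Nat)))

-- ===== PRECONDITION & SPEC =====
-- Pre_ excludes lists containing an odd number below -1 (outside the problem's natural domain
-- of nonnegative integers): there A's value reflects bin()'s sign-magnitude digit string while
-- B's bit arithmetic is two's-complement, and neither value is specified; on all other inputs,
-- including -1 and even negatives, the two agree.
def Pre_solution (numbers : List Int) : Prop := ∀ n ∈ numbers, -1 ≤ n ∨ n % 2 = 0
instance (numbers : List Int) : Decidable (Pre_solution numbers) := by unfold Pre_solution; infer_instance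

def pvWitness_solution : List Int := [0, 1, 3, 7, 12]

def Spec_solution (numbers : List Int) (out : List Int) : Prop := out = solution_alt numbers
instance (numbers : List Int) (out : List Int) : Decidable (Spec_solution numbers out) := by unfold Spec_solution; infer_instance

-- ===== CLAIM =====
def Claim_equal_solution : Prop := ∀ (numbers : List Int), Dom_solution numbers → Pre_solution numbers → Spec_solution numbers (solution numbers)

-- ===== LEMMAS AND PROOFS =====

-- trailing-ones count of a natural number (the quantity A's scan computes)
def tOnes (m : Nat) : Nat :=
  if h : m % 2 = 1 then tOnes (m / 2) + 1 else 0
  decreasing_by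
    exact Nat.div_lt_self (by omega) (by norm_num)

theorem pvCountA_digs (m : Nat) (rest : List Char) :
    pvCountA (pvDigsLSB m ++ 'b' :: rest) = tOnes m := by
  induction m using Nat.strong_induction_on with
  | _ m ih =>
    rw [pvDigsLSB, tOnes]
    by_cases h0 : m = 0
    · simp [h0, pvCountA]
    · have hlt : m / 2 < m := Nat.div_lt_self (Nat.pos_of_ne_zero h0) (by norm_num)
      by_cases h1 : m % 2 = 1
      · simp only [h0, dif_neg, not_false_iff, h1, if_pos, dif_pos, List.cons_append,
          pvCountA]
        simp [ih _ hlt, Nat.add_comm]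
      · simp [h0, h1, pvCountA]

theorem xor_succ (m : Nat) : m ^^^ (m + 1) = 2 ^ (tOnes m + 1) - 1 := by
  induction m using Nat.strong_induction_on with
  | _ m ih =>
    rw [tOnes]
    by_cases h1 : m % 2 = 1
    · have hk : m = 2 * (m / 2) + 1 := by omega
      have hlt : m / 2 < m := Nat.div_lt_self (by omega) (by norm_num)
      have hbit : m ^^^ (m + 1) = 2 * ((m / 2) ^^^ (m / 2 + 1)) + 1 := by
        have := Nat.xor_bit true (m / 2) false (m / 2 + 1)
        simp [Nat.bit_val] at this
        calc m ^^^ (m + 1) = (2 * (m / 2) + 1) ^^^ (2 * (m / 2 + 1)) := by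
              rw [← hk]; congr 1; omega
          _ = 2 * ((m / 2) ^^^ (m / 2 + 1)) + 1 := this
      rw [hbit, ih _ hlt]
      have hpos : 0 < 2 ^ (tOnes (m / 2) + 1) := Nat.two_pow_pos _
      simp only [h1, dif_pos]
      rw [pow_succ]
      omega
    · have hk : m = 2 * (m / 2) := by omega
      have hbit : m ^^^ (m + 1) = 1 := by
        have := Nat.xor_bit true (m / 2) false (m / 2)
        simp [Nat.bit_val] at this
        calc m ^^^ (m + 1) = (2 * (m / 2)) ^^^ (2 * (m / 2) + 1) := by rw [← hk]
          _ = 1 := by rw [Nat.xor_comm]; exact this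
      simp [hbit, h1]

theorem countA_eq_tOnes (n : Int) :
    pvCountA ((pvBinList n).reverse) = tOnes n.natAbs := by
  by_cases hneg : n < 0
  · have : (pvBinList n).reverse = pvDigsLSB n.natAbs ++ 'b' :: ['0', '-'] := by
      simp [pvBinList, hneg]
    rw [this, pvCountA_digs]
  · by_cases h0 : n = 0
    · subst h0
      simp [pvBinList, pvCountA]
      rw [tOnes]; simp
    · have : (pvBinList n).reverse = pvDigsLSB n.natAbs ++ 'b' :: ['0'] := by
        simp [pvBinList, hneg, h0]
      rw [this, pvCountA_digs]

-- B's expression over Int, pulled down to Nat for a nonnegative element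
theorem alt_expr_nat (m : Nat) :
    (Int.xor (m : Int) ((m : Int) + 1) + 1) >>> (2 : Nat) =
    (((m ^^^ (m + 1)) + 1) >>> 2 : Nat) := by
  have h1 : Int.xor (m : Int) ((m : Int) + 1) = ((m ^^^ (m + 1) : Nat) : Int) := by
    exact_mod_cast rfl
  rw [h1]
  exact_mod_cast rfl

theorem per_elem (m : Nat) :
    (if pvCountA ((pvBinList (m : Int)).reverse) = 0 then (m : Int) + 1
     else (m : Int) + (2 : Int) ^ (pvCountA ((pvBinList (m : Int)).reverse) - 1)) =
    (m : Int) + max 1 ((Int.xor (m : Int) ((m : Int) + 1) + 1) >>> (2 : Nat)) := by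
  rw [alt_expr_nat, countA_eq_tOnes, Int.natAbs_natCast, xor_succ]
  set a := tOnes m with ha
  have hpos : 0 < 2 ^ (a + 1) := Nat.two_pow_pos _
  have hx : (2 ^ (a + 1) - 1 + 1) >>> 2 = 2 ^ (a + 1) / 4 := by
    rw [Nat.sub_add_cancel hpos, Nat.shiftRight_eq_div_pow]
  rw [hx]
  by_cases h : a = 0
  · simp [h]
  · have h1 : 1 ≤ a := Nat.one_le_iff_ne_zero.mpr h
    have h2 : 2 ^ (a + 1) / 4 = 2 ^ (a - 1) := by
      conv_lhs => rw [show a + 1 = (a - 1) + 2 by omega]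
      rw [pow_add]
      simp
    have h3 : 1 ≤ 2 ^ (a - 1) := Nat.one_le_two_pow
    rw [h2]
    have hmax : max 1 ((2 ^ (a - 1) : Nat) : Int) = ((2 ^ (a - 1) : Nat) : Int) :=
      max_eq_right (by exact_mod_cast h3)
    rw [hmax]
    simp [h]

theorem tOnes_even (m : Nat) (h : m % 2 = 0) : tOnes m = 0 := by
  rw [tOnes]; simp [show ¬ m % 2 = 1 by omega]

theorem int_xor_even_neg (n : Int) (hneg : n < 0) (hev : n % 2 = 0) :
    Int.xor n (n + 1) = 1 := by
  obtain ⟨k, rfl⟩ : ∃ k, n = Int.negSucc k := by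
    cases n with
    | ofNat m => exact absurd hneg (by simp)
    | negSucc k => exact ⟨k, rfl⟩
  have hk : k % 2 = 1 := by
    rw [Int.negSucc_eq] at hev; omega
  have hk1 : 1 ≤ k := by omega
  have hsucc : Int.negSucc k + 1 = Int.negSucc (k - 1) := by
    rw [Int.negSucc_eq, Int.negSucc_eq]; omega
  rw [hsucc]
  show Int.ofNat (k ^^^ (k - 1)) = 1
  have he : (k - 1) % 2 = 0 := by omega
  have := xor_succ (k - 1)
  rw [tOnes_even _ he, show k - 1 + 1 = k by omega] at this
  rw [Nat.xor_comm, this]; decide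

theorem per_elem_any (n : Int) (h : -1 ≤ n ∨ n % 2 = 0) :
    (if pvCountA ((pvBinList n).reverse) = 0 then n + 1
     else n + (2 : Int) ^ (pvCountA ((pvBinList n).reverse) - 1)) =
    n + max 1 ((Int.xor n (n + 1) + 1) >>> (2 : Nat)) := by
  by_cases hpos : 0 ≤ n
  · obtain ⟨m, rfl⟩ := Int.eq_ofNat_of_zero_le hpos
    exact per_elem m
  · by_cases hone : n = -1
    · subst hone
      have h1 : tOnes ((-1 : Int)).natAbs = 1 := by
        show tOnes 1 = 1
        rw [tOnes]; norm_num; rw [tOnes]; norm_num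
      have hx : Int.xor (-1) (-1 + 1) = -1 := by decide
      rw [countA_eq_tOnes, h1, hx]
      norm_num
    · have hneg : n < 0 := by omega
      have hev : n % 2 = 0 := by
        rcases h with h | h
        · omega
        · exact h
      have hA : tOnes n.natAbs = 0 := tOnes_even _ (by omega)
      rw [countA_eq_tOnes, hA, int_xor_even_neg n hneg hev]
      norm_num
      decide

theorem foldl_acc (numbers : List Int) (acc : List Int)
    (hpre : ∀ n ∈ numbers, -1 ≤ n ∨ n % 2 = 0) :
    numbers.foldl
      (fun answer number =>
        let a := pvCountA ((pvBinList number).reverse)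
        if a = 0 then answer ++ [number + 1]
        else answer ++ [number + (2 : Int) ^ (a - 1)])
      acc = acc ++ solution_alt numbers := by
  induction numbers generalizing acc with
  | nil => simp [solution_alt]
  | cons x xs ih =>
    simp only [List.foldl_cons, solution_alt, List.map_cons]
    rw [ih _ (fun n hn => hpre n (by simp [hn]))]
    have := per_elem_any x (hpre x (by simp))
    by_cases h : pvCountA ((pvBinList x).reverse) = 0 <;>
      simp only [h, if_pos, if_neg, not_false_iff, List.append_assoc] <;>
      simp_all [solution_alt]

-- ===== VERDICT =====
theorem solution_spec : Claim_equal_solution := by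
  intro numbers _ hpre
  unfold Spec_solution solution
  rw [foldl_acc _ _ hpre]
  simp
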